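-- pv_equiv track=rewrite | github.com/jithsungh/resume_parser | src/core/complete_resume_parser.py | _determine_primary_role
-- ===== SOURCE A (Python) =====
-- from typing import Dict, Any, List, Optional
--
-- def _determine_primary_role(experiences: List[Dict]) -> Optional[str]:
--     """Determine primary/current role"""
--     if not experiences:
--         return None
--
--     roles = [exp.get('role') for exp in experiences if exp.get('role')]
--
--     if not roles:
--         return None
--
--     # If all roles are the same
--     unique_roles = list(set(roles))
--     if len(unique_roles) == 1:
--         return unique_roles[0]
--
--     # Return latest role
--     return roles[0]
-- ===== SOURCE B (Python) =====
-- from typing import Dict, List, Optional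
--
-- def _determine_primary_role(experiences: List[Dict]) -> Optional[str]:
--     """Primary role = first truthy 'role' in the list; None if there is none."""
--     for exp in experiences:
--         role = exp.get('role')
--         if role:
--             return role
--     return None
-- ===== Notes on version B (the rewrite author's own statement) =====
-- stated objective: simpler
-- what changed: Replaced the roles-list + set(uniques) construction with a single short-circuiting scan returning the first truthy 'role' (the set branch in A is dead: when all roles are equal, the unique role IS the first role), returning None when the list is empty or no role is truthy.
import Mathlib
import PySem

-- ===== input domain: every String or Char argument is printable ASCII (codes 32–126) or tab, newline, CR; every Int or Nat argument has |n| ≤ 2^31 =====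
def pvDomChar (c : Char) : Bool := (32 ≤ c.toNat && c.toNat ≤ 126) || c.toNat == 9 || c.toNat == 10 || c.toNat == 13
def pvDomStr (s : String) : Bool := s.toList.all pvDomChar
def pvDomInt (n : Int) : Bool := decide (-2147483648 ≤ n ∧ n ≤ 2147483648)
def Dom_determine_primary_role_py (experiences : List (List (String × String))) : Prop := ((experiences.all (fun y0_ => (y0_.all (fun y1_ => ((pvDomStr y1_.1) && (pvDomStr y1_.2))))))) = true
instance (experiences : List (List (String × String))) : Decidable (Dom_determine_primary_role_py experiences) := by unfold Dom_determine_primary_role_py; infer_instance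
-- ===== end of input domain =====

-- ===== PORT A =====
-- A: builds the list of truthy roles, dedups via set; B below is a single short-circuiting scan.
-- (list(set(roles)) is only indexed when it has one element, so the set's hash order is irrelevant.)
def rolesOf (experiences : List (List (String × String))) : List String :=
  experiences.filterMap (fun exp =>
    match (PySem.Dict.mk exp).get? "role" with
    | some r => if r = "" then none else some r
    | none => none)

def determine_primary_role_py (experiences : List (List (String × String))) : Option String :=
  if experiences = [] then none
  else
    let roles := rolesOf experiences
    if roles = [] then none
    else
      let unique_roles : PySem.Set String := PySem.Set.ofList roles
      if unique_roles.length = 1 then PySem.List.pyGet? unique_roles 0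
      else PySem.List.pyGet? roles 0

-- ===== PORT B =====
def determine_primary_role_py_alt (experiences : List (List (String × String))) : Option String :=
  match experiences with
  | [] => none
  | exp :: rest =>
    match (PySem.Dict.mk exp).get? "role" with
    | some r => if r = "" then determine_primary_role_py_alt rest else some r
    | none => determine_primary_role_py_alt rest

-- ===== PRECONDITION & SPEC =====
def Spec_determine_primary_role_py (experiences : List (List (String × String))) (out : Option String) : Prop := out = determine_primary_role_py_alt experiences
instance (experiences : List (List (String × String))) (out : Option String) : Decidable (Spec_determine_primary_role_py experiences out) := by unfold Spec_determine_primary_role_py; infer_instance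

-- ===== CLAIM (what is proved, stated in full; the proofs are below) =====
def Claim_equal_determine_primary_role_py : Prop := ∀ (experiences : List (List (String × String))), Dom_determine_primary_role_py experiences → Spec_determine_primary_role_py experiences (determine_primary_role_py experiences)

-- ===== LEMMAS AND PROOFS =====
-- B computes the head of A's filtered roles list.
theorem alt_eq_head (experiences : List (List (String × String))) :
    determine_primary_role_py_alt experiences = (rolesOf experiences).head? := by
  induction experiences with
  | nil => rfl
  | cons exp rest ih =>
    simp only [determine_primary_role_py_alt, rolesOf, List.filterMap_cons]
    cases h : (PySem.Dict.mk exp).get? "role" with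
    | none => simpa [rolesOf] using ih
    | some r =>
      by_cases hrr : r = ""
      · simp only [hrr, reduceIte]
        simpa [rolesOf] using ih
      · simp [hrr]

-- ===== VERDICT (by name: the statement is the Claim_ definition above) =====
theorem determine_primary_role_py_spec : Claim_equal_determine_primary_role_py := by
  intro experiences _
  unfold Spec_determine_primary_role_py determine_primary_role_py
  rw [alt_eq_head]
  by_cases he : experiences = []
  · simp [he, rolesOf]
  · simp only [he, ite_false]
    cases hr : rolesOf experiences with
    | nil => rfl
    | cons r rs =>
      rw [PySem.Set.ofList_cons]
      by_cases h1 : (r :: PySem.Set.discard (PySem.Set.ofList rs) r).length = 1 <;>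
        simp [h1, PySem.List.pyGet?, PySem.List.pyIdx?]
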